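-- pv_equiv track=rewrite | github.com/AlexanderBedrosyan/Programming-Fundamentals-with-Python | Text Processing - Exercise/character_multiplier_1.py | character_multiplier
-- ===== SOURCE A (Python) =====
-- def character_multiplier(word):
--     total_sum = 0
--     number = 0
--
--     if len(word[0]) > len(word[1]):
--         number = len(word[0])
--     else:
--         number = len(word[1])
--
--     for i in range(number):
--         if (len(word[0]) - 1) < i <= (len(word[1]) - 1):
--             total_sum += ord(word[1][i])
--         elif len(word[0]) - 1 >= i > len(word[1]) - 1:
--             total_sum += ord(word[0][i])
--         else:
--             total_sum += (ord(word[0][i]) * ord(word[1][i]))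
--
--     return total_sum
-- ===== SOURCE B (Python) =====
-- def character_multiplier(word):
--     first, second = word[0], word[1]
--     return (sum(ord(x) * ord(y) for x, y in zip(first, second))
--             + sum(ord(c) for c in first[len(second):])
--             + sum(ord(c) for c in second[len(first):]))
-- ===== Notes on version B (the rewrite author's own statement) =====
-- stated objective: simpler
-- what changed: Replaces the indexed loop over range(max len) with its three index-comparison branches by zip over the common prefix plus a slice for whichever string's tail remains, removing the max-length computation and all index arithmetic.
import Mathlib
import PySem

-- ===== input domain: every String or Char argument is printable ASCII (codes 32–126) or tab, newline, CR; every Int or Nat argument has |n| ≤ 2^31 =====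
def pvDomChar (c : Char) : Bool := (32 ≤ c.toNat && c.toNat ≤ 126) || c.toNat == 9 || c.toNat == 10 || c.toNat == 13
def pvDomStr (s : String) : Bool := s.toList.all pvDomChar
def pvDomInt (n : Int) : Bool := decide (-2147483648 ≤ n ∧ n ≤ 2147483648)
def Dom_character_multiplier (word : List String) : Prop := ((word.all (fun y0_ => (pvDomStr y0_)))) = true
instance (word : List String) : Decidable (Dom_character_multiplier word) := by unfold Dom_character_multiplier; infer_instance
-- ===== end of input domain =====

-- B replaces the indexed max-length loop with zip over the common prefix plus the leftover tail (simpler decomposition).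

-- ===== PORT A =====
-- word[0]/word[1] exist under Pre_; char indexing word[j][i] is in range in every branch taken,
-- so List.getD with a dummy default is exact there.
def character_multiplier (word : List String) : Int :=
  let a := ((PySem.List.pyGet? word 0).getD "").toList
  let b := ((PySem.List.pyGet? word 1).getD "").toList
  let number : Int := if (a.length : Int) > (b.length : Int) then (a.length : Int) else (b.length : Int)
  (PySem.List.pyRange 0 number 1).foldl
    (fun total_sum i =>
      if (a.length : Int) - 1 < i ∧ i ≤ (b.length : Int) - 1 then
        total_sum + ((b.getD i.toNat ' ').toNat : Int)
      else if (a.length : Int) - 1 ≥ i ∧ i > (b.length : Int) - 1 then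
        total_sum + ((a.getD i.toNat ' ').toNat : Int)
      else
        total_sum + ((a.getD i.toNat ' ').toNat : Int) * ((b.getD i.toNat ' ').toNat : Int))
    0

-- ===== PORT B =====
-- first[len(second):] with a nonnegative start index is List.drop (exact).
def character_multiplier_alt (word : List String) : Int :=
  let first := ((PySem.List.pyGet? word 0).getD "").toList
  let second := ((PySem.List.pyGet? word 1).getD "").toList
  ((first.zip second).map (fun p => (p.1.toNat : Int) * (p.2.toNat : Int))).sum
    + ((first.drop second.length).map (fun c => (c.toNat : Int))).sum
    + ((second.drop first.length).map (fun c => (c.toNat : Int))).sum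

-- ===== PRECONDITION & SPEC =====
-- Pre_: Python A raises IndexError on word[0]/word[1] when the list has fewer than two elements.
def Pre_character_multiplier (word : List String) : Prop := 2 ≤ word.length
instance (word : List String) : Decidable (Pre_character_multiplier word) := by unfold Pre_character_multiplier; infer_instance
def pvWitness_character_multiplier : List String := (["abc", "de"])

def Spec_character_multiplier (word : List String) (out : Int) : Prop := out = character_multiplier_alt word
instance (word : List String) (out : Int) : Decidable (Spec_character_multiplier word out) := by unfold Spec_character_multiplier; infer_instance

-- ===== CLAIM (what is proved, stated in full; the proofs are below) =====
def Claim_equal_character_multiplier : Prop := ∀ (word : List String), Dom_character_multiplier word → Pre_character_multiplier word → Spec_character_multiplier word (character_multiplier word)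

-- ===== LEMMAS AND PROOFS =====

-- A's loop body as a function of the index
def pvG (a b : List Char) (i : Int) : Int :=
  if (a.length : Int) - 1 < i ∧ i ≤ (b.length : Int) - 1 then ((b.getD i.toNat ' ').toNat : Int)
  else if (a.length : Int) - 1 ≥ i ∧ i > (b.length : Int) - 1 then ((a.getD i.toNat ' ').toNat : Int)
  else ((a.getD i.toNat ' ').toNat : Int) * ((b.getD i.toNat ' ').toNat : Int)

-- B's result as a function of the two char lists
def pvS (a b : List Char) : Int :=
  ((a.zip b).map (fun p => (p.1.toNat : Int) * (p.2.toNat : Int))).sum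
    + ((a.drop b.length).map (fun c => (c.toNat : Int))).sum
    + ((b.drop a.length).map (fun c => (c.toNat : Int))).sum

lemma pv_map_getD (l : List Char) :
    (List.range l.length).map (fun (k : ℕ) => ((l.getD k ' ').toNat : Int)) = l.map (fun c => (c.toNat : Int)) := by
  induction l with
  | nil => simp
  | cons x xs ih =>
    simp [List.range_succ_eq_map, List.map_map]
    exact ih

lemma pv_key (a b : List Char) :
    ((List.range (max a.length b.length)).map (fun (k : ℕ) => pvG a b (k : Int))).sum = pvS a b := by
  induction a generalizing b with
  | nil =>
    have h1 : ∀ k ∈ List.range b.length,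
        (fun (k : ℕ) => pvG [] b (k : Int)) k = (fun (k : ℕ) => ((b.getD k ' ').toNat : Int)) k := by
      intro k hk
      have hk' := List.mem_range.mp hk
      simp only [pvG, List.length_nil]
      rw [if_pos (by push_cast; omega)]
      simp
    rw [List.length_nil, Nat.max_eq_right (Nat.zero_le _), List.map_congr_left h1, pv_map_getD]
    simp [pvS]
  | cons x xs ih =>
    cases b with
    | nil =>
      have h1 : ∀ k ∈ List.range (x :: xs).length,
          (fun (k : ℕ) => pvG (x :: xs) [] (k : Int)) k = (fun (k : ℕ) => (((x :: xs).getD k ' ').toNat : Int)) k := by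
        intro k hk
        have hk' := List.mem_range.mp hk
        simp only [pvG, List.length_nil, List.length_cons] at hk' ⊢
        rw [if_neg (by push_cast; omega), if_pos (by push_cast; omega)]
        simp
      rw [List.length_nil, Nat.max_eq_left (Nat.zero_le _), List.map_congr_left h1, pv_map_getD]
      simp [pvS]
    | cons y ys =>
      have hmax : max (x :: xs).length (y :: ys).length = (max xs.length ys.length) + 1 := by
        simp [Nat.succ_max_succ]
      have h0 : pvG (x :: xs) (y :: ys) ((0 : ℕ) : Int) = (x.toNat : Int) * (y.toNat : Int) := by
        simp only [pvG, List.length_cons]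
        rw [if_neg (by push_cast; omega), if_neg (by push_cast; omega)]
        simp
      have hsucc : ∀ k ∈ List.range (max xs.length ys.length),
          ((fun (k : ℕ) => pvG (x :: xs) (y :: ys) (k : Int)) ∘ Nat.succ) k
            = (fun (k : ℕ) => pvG xs ys (k : Int)) k := by
        intro k _
        simp only [Function.comp, pvG, List.length_cons, Nat.succ_eq_add_one]
        have ht : ((k + 1 : ℕ) : Int).toNat = k + 1 := by omega
        simp only [ht, Int.toNat_natCast, List.getD_cons_succ]
        congr 1 <;> [skip; congr 1] <;> (apply propext; push_cast; constructor <;> (intro h; omega))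
      rw [hmax, List.range_succ_eq_map, List.map_cons, List.map_map, List.sum_cons,
        List.map_congr_left hsucc, ih ys, h0]
      simp only [pvS, List.zip_cons_cons, List.map_cons, List.sum_cons, List.length_cons,
        List.drop_succ_cons]
      ring

-- ===== VERDICT (by name: the statement is the Claim_ definition above) =====
theorem character_multiplier_spec : Claim_equal_character_multiplier := by
  intro word _ _
  unfold Spec_character_multiplier
  simp only [character_multiplier, character_multiplier_alt]
  set a := ((PySem.List.pyGet? word 0).getD "").toList with ha
  set b := ((PySem.List.pyGet? word 1).getD "").toList with hb
  have hbody : (fun (total_sum : Int) (i : Int) =>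
      if (a.length : Int) - 1 < i ∧ i ≤ (b.length : Int) - 1 then
        total_sum + ((b.getD i.toNat ' ').toNat : Int)
      else if (a.length : Int) - 1 ≥ i ∧ i > (b.length : Int) - 1 then
        total_sum + ((a.getD i.toNat ' ').toNat : Int)
      else
        total_sum + ((a.getD i.toNat ' ').toNat : Int) * ((b.getD i.toNat ' ').toNat : Int))
      = (fun total_sum i => total_sum + pvG a b i) := by
    funext s i
    simp only [pvG]
    split_ifs <;> rfl
  rw [hbody, PySem.List.foldl_add]
  have hnum : (if (a.length : Int) > (b.length : Int) then (a.length : Int) else (b.length : Int))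
      = ((max a.length b.length : ℕ) : Int) := by
    split_ifs <;> (push_cast; omega)
  rw [hnum, PySem.List.pyRange_zero_natCast, List.map_map]
  have hk := pv_key a b
  simp only [pvS] at hk
  simpa [Function.comp] using hk
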